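-- pv_equiv track=rewrite | github.com/deb21vs/shoptalk | src/preprocess_products_without_EDA.py | _pick_lang_value
-- ===== SOURCE A (Python) =====
-- from typing import Any, Dict, List, Optional
--
-- def _pick_lang_value(items: Any, lang: str = "en_US") -> str:
--     """From a list of dicts with {language_tag, value}, pick preferred language, else first non-empty."""
--     if not isinstance(items, list) or not items:
--         return ""
--     # exact language match
--     for it in items:
--         if it.get("language_tag") == lang and it.get("value"):
--             return str(it["value"])
--     # fallback: any value
--     for it in items:
--         if it.get("value"):
--             return str(it["value"])
--     return ""
-- ===== SOURCE B (Python) =====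
-- def _pick_lang_value(items, lang="en_US"):
--     """From a list of dicts with {language_tag, value}, pick preferred language, else first non-empty."""
--     if not isinstance(items, list) or not items:
--         return ""
--     fallback = None
--     for it in items:
--         v = it.get("value")
--         if v:
--             if it.get("language_tag") == lang:
--                 return str(v)
--             if fallback is None:
--                 fallback = str(v)
--     return fallback if fallback is not None else ""
-- ===== Notes on version B (the rewrite author's own statement) =====
-- stated objective: alternative
-- what changed: Replaces A's two sequential scans (exact-language pass, then fallback pass) with one single pass that returns immediately on an exact match and records the first truthy value as fallback.
import Mathlib
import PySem

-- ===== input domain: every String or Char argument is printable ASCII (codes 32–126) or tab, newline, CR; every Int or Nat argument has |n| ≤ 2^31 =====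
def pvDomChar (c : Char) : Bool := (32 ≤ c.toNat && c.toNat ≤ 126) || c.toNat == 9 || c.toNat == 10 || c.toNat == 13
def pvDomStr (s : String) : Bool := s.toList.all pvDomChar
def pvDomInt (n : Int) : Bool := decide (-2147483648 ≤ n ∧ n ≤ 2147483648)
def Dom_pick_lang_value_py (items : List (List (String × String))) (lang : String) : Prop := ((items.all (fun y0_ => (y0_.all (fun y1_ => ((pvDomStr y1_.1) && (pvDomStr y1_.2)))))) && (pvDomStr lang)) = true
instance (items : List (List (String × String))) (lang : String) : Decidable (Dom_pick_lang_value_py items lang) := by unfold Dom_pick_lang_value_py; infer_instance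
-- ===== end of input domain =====

-- B folds A's two sequential scans into one pass with a fallback accumulator; same return value everywhere (objective: alternative decomposition, not measured faster).

-- ===== PORT A =====
-- it.get(k): association-list lookup, first match (dict → assoc list convention)
def pvDget (it : List (String × String)) (k : String) : Option String :=
  (it.find? (fun p => p.1 == k)).map (fun p => p.2)

-- first loop of A: exact language match with truthy value
def pvLoopExact (items : List (List (String × String))) (lang : String) : Option String :=
  match items with
  | [] => none
  | it :: rest =>
    if pvDget it "language_tag" = some lang ∧ (pvDget it "value").getD "" ≠ "" then
      (pvDget it "value").getD ""
    else pvLoopExact rest lang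

-- second loop of A: any truthy value
def pvLoopAny (items : List (List (String × String))) : Option String :=
  match items with
  | [] => none
  | it :: rest =>
    if (pvDget it "value").getD "" ≠ "" then (pvDget it "value").getD ""
    else pvLoopAny rest

def pick_lang_value_py (items : List (List (String × String))) (lang : String) : String :=
  if items = [] then ""
  else
    match pvLoopExact items lang with
    | some v => v
    | none =>
      match pvLoopAny items with
      | some v => v
      | none => ""

-- ===== PORT B =====
-- single pass: return on exact match, record first truthy value as fallback
def pvLoopB (items : List (List (String × String))) (lang : String) (fallback : Option String) : String :=
  match items with
  | [] => fallback.getD ""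
  | it :: rest =>
    match pvDget it "value" with
    | some v =>
      if v ≠ "" then
        if pvDget it "language_tag" = some lang then v
        else pvLoopB rest lang (match fallback with | none => some v | some f => some f)
      else pvLoopB rest lang fallback
    | none => pvLoopB rest lang fallback

def pick_lang_value_py_alt (items : List (List (String × String))) (lang : String) : String :=
  if items = [] then "" else pvLoopB items lang none

-- ===== PRECONDITION & SPEC =====
def Spec_pick_lang_value_py (items : List (List (String × String))) (lang : String) (out : String) : Prop := out = pick_lang_value_py_alt items lang
instance (items : List (List (String × String))) (lang : String) (out : String) : Decidable (Spec_pick_lang_value_py items lang out) := by unfold Spec_pick_lang_value_py; infer_instance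

-- ===== CLAIM (what is proved, stated in full; the proofs are below) =====
def Claim_equal_pick_lang_value_py : Prop := ∀ (items : List (List (String × String))) (lang : String), Dom_pick_lang_value_py items lang → Spec_pick_lang_value_py items lang (pick_lang_value_py items lang)

-- ===== LEMMAS AND PROOFS =====

-- loop invariant: B's single pass equals A's exact scan, then the recorded fallback, then A's any scan
theorem pvLoopB_eq (items : List (List (String × String))) (lang : String) (fb : Option String) :
    pvLoopB items lang fb =
      match pvLoopExact items lang with
      | some v => v
      | none =>
        match fb with
        | some f => f
        | none =>
          match pvLoopAny items with
          | some v => v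
          | none => "" := by
  induction items generalizing fb with
  | nil => cases fb <;> simp [pvLoopB, pvLoopExact, pvLoopAny, Option.getD]
  | cons it rest ih =>
    cases hv : pvDget it "value" with
    | none =>
      simp only [pvLoopB, pvLoopExact, pvLoopAny, hv, Option.getD, ne_eq, not_true_eq_false,
        and_false, if_false]
      exact ih fb
    | some v =>
      by_cases hvne : v = ""
      · subst hvne
        simp only [pvLoopB, pvLoopExact, pvLoopAny, hv, Option.getD, ne_eq, not_true_eq_false,
          and_false, if_false]
        exact ih fb
      · by_cases hl : pvDget it "language_tag" = some lang
        · simp [pvLoopB, pvLoopExact, hv, hl, hvne]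
        · simp only [pvLoopB, pvLoopExact, pvLoopAny, hv, hl, Option.getD, ne_eq, hvne,
            not_false_eq_true, and_true, false_and, if_false, if_true]
          rw [ih]
          cases fb <;> cases pvLoopExact rest lang <;> simp [hl]

-- ===== VERDICT (by name: the statement is the Claim_ definition above) =====
theorem pick_lang_value_py_spec : Claim_equal_pick_lang_value_py := by
  intro items lang _
  unfold Spec_pick_lang_value_py pick_lang_value_py pick_lang_value_py_alt
  by_cases h : items = []
  · simp [h]
  · simp only [if_neg h]
    rw [pvLoopB_eq]
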